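-- pv_equiv track=rewrite | github.com/Bimo99B9/autoUniCalendar | utils.py | verifyCookieStructure
-- ===== SOURCE A (Python) =====
-- def verifyCookieStructure(cookie) -> bool:
--     if cookie is None: return False
--     if cookie == "0000XXXXXXXXXXXXXXXXXXXXXXX:1dXXXXXXX": return False
--     if len(cookie) != 37: return False
--     for i in range(4):
--         if cookie[i] != "0": return False
--     if cookie[27] != ":" or cookie[28] != "1" or cookie[29] != "d":
--         return False
--     return True
-- ===== SOURCE B (Python) =====
-- # Data-driven template matcher: a 37-char mask encodes the whole format
-- # ('0' / ':' / '1' / 'd' are literals, '.' is a wildcard); the string is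
-- # validated by one uniform pass over zip(cookie, mask), plus the blacklist.
-- MASK = "0000" + "." * 23 + ":1d" + "." * 7
--
-- def verifyCookieStructure(cookie) -> bool:
--     if cookie is None:
--         return False
--     if cookie == "0000XXXXXXXXXXXXXXXXXXXXXXX:1dXXXXXXX":
--         return False
--     return len(cookie) == len(MASK) and all(
--         m == "." or c == m for c, m in zip(cookie, MASK)
--     )
-- ===== Notes on version B (the rewrite author's own statement) =====
-- stated objective: alternative
-- what changed: Replaces A's hard-coded per-index checks (length, four leading indices, three marker indices) with a data-driven template matcher: a 37-character mask with a wildcard character is validated in one uniform pass over zip(cookie, mask).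
import Mathlib
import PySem

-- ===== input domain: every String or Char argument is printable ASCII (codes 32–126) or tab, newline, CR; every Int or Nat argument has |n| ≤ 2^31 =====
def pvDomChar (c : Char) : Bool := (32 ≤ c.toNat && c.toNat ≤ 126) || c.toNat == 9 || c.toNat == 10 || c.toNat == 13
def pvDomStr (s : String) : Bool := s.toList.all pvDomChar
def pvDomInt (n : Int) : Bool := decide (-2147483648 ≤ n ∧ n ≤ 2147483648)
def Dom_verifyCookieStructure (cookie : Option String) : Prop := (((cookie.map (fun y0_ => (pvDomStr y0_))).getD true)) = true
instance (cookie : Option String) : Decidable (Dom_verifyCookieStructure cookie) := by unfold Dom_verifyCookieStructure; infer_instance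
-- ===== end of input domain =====

-- B replaces A's hard-coded per-index checks with a data-driven template matcher: a 37-character
-- mask ('.' = wildcard) is validated by one uniform pass over zip(cookie, mask); same O(1) cost.

def blacklistPV : String := "0000XXXXXXXXXXXXXXXXXXXXXXX:1dXXXXXXX"

-- ===== PORT A =====
def verifyCookieStructure (cookie : Option String) : Bool :=
  match cookie with
  | none => false
  | some c =>
    if c = blacklistPV then false
    else if PySem.Str.len c != 37 then false
    else if !((PySem.List.pyRange 0 4 1).all (fun i => PySem.Str.pyGet? c i == some '0')) then false
    else if PySem.Str.pyGet? c 27 != some ':' || PySem.Str.pyGet? c 28 != some '1' || PySem.Str.pyGet? c 29 != some 'd' then false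
    else true

-- ===== PORT B =====
def maskPV : String := "0000.......................:1d......."

def verifyCookieStructure_alt (cookie : Option String) : Bool :=
  match cookie with
  | none => false
  | some c =>
    if c = blacklistPV then false
    else
      decide (PySem.Str.len c = PySem.Str.len maskPV) &&
      (c.toList.zip maskPV.toList).all (fun p => p.2 == '.' || p.1 == p.2)

-- ===== PRECONDITION & SPEC =====
def Spec_verifyCookieStructure (cookie : Option String) (out : Bool) : Prop := out = verifyCookieStructure_alt cookie
instance (cookie : Option String) (out : Bool) : Decidable (Spec_verifyCookieStructure cookie out) := by unfold Spec_verifyCookieStructure; infer_instance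

-- ===== CLAIM (what is proved, stated in full; the proofs are below) =====
def Claim_equal_verifyCookieStructure : Prop := ∀ (cookie : Option String), Dom_verifyCookieStructure cookie → Spec_verifyCookieStructure cookie (verifyCookieStructure cookie)

-- ===== LEMMAS AND PROOFS =====

theorem verifyCookieStructure_eq_alt (cookie : Option String) :
    verifyCookieStructure cookie = verifyCookieStructure_alt cookie := by
  cases cookie with
  | none => rfl
  | some s =>
    simp only [verifyCookieStructure, verifyCookieStructure_alt]
    by_cases hbl : s = blacklistPV
    · simp [hbl]
    · simp only [hbl, if_neg, not_false_iff]
      rw [show (PySem.List.pyRange 0 4 1) = [0,1,2,3] from by decide]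
      apply Bool.eq_iff_iff.mpr
      by_cases hlen : s.toList.length = 37
      case neg =>
        constructor <;> intro h <;> exfalso
        · split_ifs at h <;> simp_all [PySem.Str.len] <;> omega
        · simp only [Bool.and_eq_true, decide_eq_true_eq] at h
          simp_all [PySem.Str.len, maskPV]
          omega
      case pos =>
        simp only [PySem.Str.pyGet?_eq, PySem.Str.len_eq, PySem.Chars.pyGet?_eq_listPyGet?]
        obtain ⟨cs, rfl⟩ : ∃ cs, s = String.ofList cs := ⟨s.toList, (String.ofList_toList (s := s)).symm⟩
        simp only [String.toList_ofList] at hlen ⊢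
        obtain ⟨c0, cs, rfl⟩ := List.exists_of_length_succ cs (by omega)
        replace hlen : cs.length = 36 := by simpa using hlen
        obtain ⟨c1, cs, rfl⟩ := List.exists_of_length_succ cs (by omega)
        replace hlen : cs.length = 35 := by simpa using hlen
        obtain ⟨c2, cs, rfl⟩ := List.exists_of_length_succ cs (by omega)
        replace hlen : cs.length = 34 := by simpa using hlen
        obtain ⟨c3, cs, rfl⟩ := List.exists_of_length_succ cs (by omega)
        replace hlen : cs.length = 33 := by simpa using hlen
        obtain ⟨c4, cs, rfl⟩ := List.exists_of_length_succ cs (by omega)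
        replace hlen : cs.length = 32 := by simpa using hlen
        obtain ⟨c5, cs, rfl⟩ := List.exists_of_length_succ cs (by omega)
        replace hlen : cs.length = 31 := by simpa using hlen
        obtain ⟨c6, cs, rfl⟩ := List.exists_of_length_succ cs (by omega)
        replace hlen : cs.length = 30 := by simpa using hlen
        obtain ⟨c7, cs, rfl⟩ := List.exists_of_length_succ cs (by omega)
        replace hlen : cs.length = 29 := by simpa using hlen
        obtain ⟨c8, cs, rfl⟩ := List.exists_of_length_succ cs (by omega)
        replace hlen : cs.length = 28 := by simpa using hlen
        obtain ⟨c9, cs, rfl⟩ := List.exists_of_length_succ cs (by omega)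
        replace hlen : cs.length = 27 := by simpa using hlen
        obtain ⟨c10, cs, rfl⟩ := List.exists_of_length_succ cs (by omega)
        replace hlen : cs.length = 26 := by simpa using hlen
        obtain ⟨c11, cs, rfl⟩ := List.exists_of_length_succ cs (by omega)
        replace hlen : cs.length = 25 := by simpa using hlen
        obtain ⟨c12, cs, rfl⟩ := List.exists_of_length_succ cs (by omega)
        replace hlen : cs.length = 24 := by simpa using hlen
        obtain ⟨c13, cs, rfl⟩ := List.exists_of_length_succ cs (by omega)
        replace hlen : cs.length = 23 := by simpa using hlen
        obtain ⟨c14, cs, rfl⟩ := List.exists_of_length_succ cs (by omega)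
        replace hlen : cs.length = 22 := by simpa using hlen
        obtain ⟨c15, cs, rfl⟩ := List.exists_of_length_succ cs (by omega)
        replace hlen : cs.length = 21 := by simpa using hlen
        obtain ⟨c16, cs, rfl⟩ := List.exists_of_length_succ cs (by omega)
        replace hlen : cs.length = 20 := by simpa using hlen
        obtain ⟨c17, cs, rfl⟩ := List.exists_of_length_succ cs (by omega)
        replace hlen : cs.length = 19 := by simpa using hlen
        obtain ⟨c18, cs, rfl⟩ := List.exists_of_length_succ cs (by omega)
        replace hlen : cs.length = 18 := by simpa using hlen
        obtain ⟨c19, cs, rfl⟩ := List.exists_of_length_succ cs (by omega)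
        replace hlen : cs.length = 17 := by simpa using hlen
        obtain ⟨c20, cs, rfl⟩ := List.exists_of_length_succ cs (by omega)
        replace hlen : cs.length = 16 := by simpa using hlen
        obtain ⟨c21, cs, rfl⟩ := List.exists_of_length_succ cs (by omega)
        replace hlen : cs.length = 15 := by simpa using hlen
        obtain ⟨c22, cs, rfl⟩ := List.exists_of_length_succ cs (by omega)
        replace hlen : cs.length = 14 := by simpa using hlen
        obtain ⟨c23, cs, rfl⟩ := List.exists_of_length_succ cs (by omega)
        replace hlen : cs.length = 13 := by simpa using hlen
        obtain ⟨c24, cs, rfl⟩ := List.exists_of_length_succ cs (by omega)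
        replace hlen : cs.length = 12 := by simpa using hlen
        obtain ⟨c25, cs, rfl⟩ := List.exists_of_length_succ cs (by omega)
        replace hlen : cs.length = 11 := by simpa using hlen
        obtain ⟨c26, cs, rfl⟩ := List.exists_of_length_succ cs (by omega)
        replace hlen : cs.length = 10 := by simpa using hlen
        obtain ⟨c27, cs, rfl⟩ := List.exists_of_length_succ cs (by omega)
        replace hlen : cs.length = 9 := by simpa using hlen
        obtain ⟨c28, cs, rfl⟩ := List.exists_of_length_succ cs (by omega)
        replace hlen : cs.length = 8 := by simpa using hlen
        obtain ⟨c29, cs, rfl⟩ := List.exists_of_length_succ cs (by omega)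
        replace hlen : cs.length = 7 := by simpa using hlen
        obtain ⟨c30, cs, rfl⟩ := List.exists_of_length_succ cs (by omega)
        replace hlen : cs.length = 6 := by simpa using hlen
        obtain ⟨c31, cs, rfl⟩ := List.exists_of_length_succ cs (by omega)
        replace hlen : cs.length = 5 := by simpa using hlen
        obtain ⟨c32, cs, rfl⟩ := List.exists_of_length_succ cs (by omega)
        replace hlen : cs.length = 4 := by simpa using hlen
        obtain ⟨c33, cs, rfl⟩ := List.exists_of_length_succ cs (by omega)
        replace hlen : cs.length = 3 := by simpa using hlen
        obtain ⟨c34, cs, rfl⟩ := List.exists_of_length_succ cs (by omega)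
        replace hlen : cs.length = 2 := by simpa using hlen
        obtain ⟨c35, cs, rfl⟩ := List.exists_of_length_succ cs (by omega)
        replace hlen : cs.length = 1 := by simpa using hlen
        obtain ⟨c36, cs, rfl⟩ := List.exists_of_length_succ cs (by omega)
        replace hlen : cs.length = 0 := by simpa using hlen
        obtain rfl : cs = [] := List.length_eq_zero_iff.mp hlen
        simp [maskPV, PySem.List.pyGet?, PySem.List.pyIdx?, List.zip, List.all]
        tauto

-- ===== VERDICT (by name: the statement is the Claim_ definition above) =====
theorem verifyCookieStructure_spec : Claim_equal_verifyCookieStructure := by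
  intro cookie _
  exact verifyCookieStructure_eq_alt cookie
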